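-- pv_equiv track=rewrite | github.com/DuvanMontoya/Investigaci-n---Anclaje-Inerte | Codigo/Pruebas/ValidarHeegner.py | N_bruteforce
-- ===== SOURCE A (Python) =====
-- from typing import Iterable, List, Tuple
--
-- def chi_D_prime(D: int, p: int) -> int:
--     if p == 2:
--         if (D & 1) == 0:
--             return 0
--         r = D % 8
--         return 1 if r in (1, 7) else -1
--     if D % p == 0:
--         return 0
--     t = pow(D % p, (p - 1) // 2, p)
--     return 1 if t == 1 else -1
--
-- def factorize(n: int) -> List[Tuple[int, int]]:
--     out: List[Tuple[int, int]] = []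
--     t = int(n)
--     p = 2
--     while p * p <= t:
--         if t % p == 0:
--             e = 0
--             while t % p == 0:
--                 t //= p
--                 e += 1
--             out.append((p, e))
--         p = 3 if p == 2 else p + 2
--     if t > 1:
--         out.append((t, 1))
--     return out
--
-- def is_norm_inerte_only(D: int, n: int) -> bool:
--     if n <= 0:
--         return False
--     for p, e in factorize(n):
--         if chi_D_prime(D, p) == -1 and (e % 2 == 1):
--             return False
--     return True
--
-- def N_bruteforce(D: int, R: int) -> int:
--     rr = R * R
--     cnt = 0
--     for c in range(1, R):
--         n = rr - c * c
--         if is_norm_inerte_only(D, n):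
--             cnt += 1
--     return cnt
-- ===== SOURCE B (Python) =====
-- # B: instead of trial-dividing n = R^2 - c^2 (magnitude ~R^2), factor the two
-- # cofactors a = R - c and b = R + c (magnitude ~R) and apply the inert test to
-- # each prime with its TOTAL exponent e_a(p) + e_b(p); chi_D_prime is unchanged.
-- from typing import List, Tuple
--
--
-- def chi_D_prime(D: int, p: int) -> int:
--     if p == 2:
--         if (D & 1) == 0:
--             return 0
--         r = D % 8
--         return 1 if r in (1, 7) else -1
--     if D % p == 0:
--         return 0
--     t = pow(D % p, (p - 1) // 2, p)
--     return 1 if t == 1 else -1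
--
--
-- def _factor(n: int) -> List[Tuple[int, int]]:
--     # trial division: strip 2 first, then odd candidates only
--     out: List[Tuple[int, int]] = []
--     m = n
--     e = 0
--     while m % 2 == 0 and m > 0:
--         m //= 2
--         e += 1
--     if e:
--         out.append((2, e))
--     p = 3
--     while p * p <= m:
--         e = 0
--         while m % p == 0:
--             m //= p
--             e += 1
--         if e:
--             out.append((p, e))
--         p += 2
--     if m > 1:
--         out.append((m, 1))
--     return out
--
--
-- def _mult(p: int, m: int) -> int:
--     e = 0
--     while m % p == 0:
--         m //= p
--         e += 1
--     return e
--
--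
-- def _ok(D: int, a: int, b: int) -> bool:
--     # a*b is inert-norm-only iff no prime p | a*b has chi_D(p) == -1 and odd
--     # total exponent; primes of a and of b are each tested with the total.
--     for p, e in _factor(a):
--         if chi_D_prime(D, p) == -1 and (e + _mult(p, b)) % 2 == 1:
--             return False
--     for p, e in _factor(b):
--         if chi_D_prime(D, p) == -1 and (e + _mult(p, a)) % 2 == 1:
--             return False
--     return True
--
--
-- def N_bruteforce(D: int, R: int) -> int:
--     cnt = 0
--     for c in range(1, R):
--         if _ok(D, R - c, R + c):
--             cnt += 1
--     return cnt
-- ===== Notes on version B (the rewrite author's own statement) =====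
-- stated objective: faster
-- what changed: Instead of trial-dividing n = R^2 - c^2 (magnitude ~R^2) for each c, B factors the two cofactors a = R - c and b = R + c (magnitude ~R) and applies the inert test to each prime with its total exponent e_a(p) + e_b(p), computing the missing cofactor's exponent by direct division; chi_D_prime and factorize are unchanged.
import Mathlib
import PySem

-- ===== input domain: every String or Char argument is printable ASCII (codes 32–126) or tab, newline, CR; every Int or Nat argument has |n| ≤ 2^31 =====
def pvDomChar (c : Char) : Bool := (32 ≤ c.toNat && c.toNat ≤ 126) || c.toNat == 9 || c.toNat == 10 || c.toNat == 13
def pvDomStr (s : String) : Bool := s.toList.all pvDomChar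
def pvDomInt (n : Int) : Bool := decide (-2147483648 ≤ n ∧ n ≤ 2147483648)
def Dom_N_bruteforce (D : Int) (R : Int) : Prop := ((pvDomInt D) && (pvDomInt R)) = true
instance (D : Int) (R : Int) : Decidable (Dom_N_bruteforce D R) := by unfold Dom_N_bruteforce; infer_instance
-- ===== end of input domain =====

-- B factors the two cofactors R-c and R+c (magnitude ~R) instead of trial-dividing
-- R^2-c^2 (magnitude ~R^2) and tests each prime with its total exponent; measured faster.

-- ===== PORT A =====

-- chi_D_prime (identical source in Source A and Source B, shared by both ports).
-- pow(D % p, (p-1)//2, p) is PySem.Int.powMod; the .toNat on the exponent is exact for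
-- p ≥ 1 (every call site passes p ≥ 3 on this branch).
def chiD (D p : Int) : Int :=
  if p = 2 then
    if PySem.Int.band D 1 = 0 then 0
    else if PySem.Int.mod D 8 = 1 ∨ PySem.Int.mod D 8 = 7 then 1 else -1
  else if PySem.Int.mod D p = 0 then 0
  else if PySem.Int.powMod (PySem.Int.mod D p) ((PySem.Int.floordiv (p - 1) 2).toNat) p = 1
    then 1 else -1

-- the inner 'while t % p == 0: t //= p; e += 1' loop shared by factorize (Source A and
-- Source B) and Source B's 2-stripping loop; state is the pair (t, e). The fuel argument and
-- the 2 ≤ p / 0 < t guard conjuncts only make the loop total (every call passes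
-- fuel ≥ t, which the lemmas below show suffices; Python diverges on 0 < t failing,
-- which no call site reaches).
def stripLoop : Nat → Nat → Nat → Nat × Nat
  | 0, t, _ => (t, 0)
  | fuel + 1, t, p =>
    if 2 ≤ p ∧ 0 < t ∧ t % p = 0 then
      let r := stripLoop fuel (t / p) p
      (r.1, r.2 + 1)
    else (t, 0)

-- 'p = 3 if p == 2 else p + 2'
def nextP (p : Nat) : Nat := if p = 2 then 3 else p + 2

-- outer 'while p * p <= t' of A's factorize plus the trailing 'if t > 1' append;
-- fuel ≥ t + 1 - p always suffices (the fuel-exhausted branch repeats the loop-exit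
-- code and is proved unreachable under that bound)
def factLoop : Nat → Nat → Nat → List (Int × Int)
  | 0, t, _ => if 1 < t then [((t : Int), 1)] else []
  | fuel + 1, t, p =>
    if p * p ≤ t then
      if t % p = 0 then
        ((p : Int), ((stripLoop t t p).2 : Int)) :: factLoop fuel (stripLoop t t p).1 (nextP p)
      else factLoop fuel t (nextP p)
    else if 1 < t then [((t : Int), 1)] else []

-- factorize: 't = int(n)' and the loop run over a nonnegative t throughout (for n ≤ 0
-- the Python loop body never executes and [] is returned, as here), so t lives in Nat
def factorize (n : Int) : List (Int × Int) := factLoop (n.toNat + 1) n.toNat 2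

-- the 'for p, e in factorize(n): if chi ... and e % 2 == 1: return False' loop of A
def inertLoop (D : Int) : List (Int × Int) → Bool
  | [] => true
  | (p, e) :: rest =>
      if chiD D p = -1 ∧ PySem.Int.mod e 2 = 1 then false else inertLoop D rest

def is_norm_inerte_only (D n : Int) : Bool :=
  if n ≤ 0 then false else inertLoop D (factorize n)

def N_bruteforce (D : Int) (R : Int) : Int :=
  let rr := R * R
  (PySem.List.pyRange 1 R 1).foldl
    (fun cnt c => if is_norm_inerte_only D (rr - c * c) then cnt + 1 else cnt) 0

-- ===== PORT B =====

-- odd-candidate 'while p * p <= m' loop of Source B's _factor (entered with p = 3, steps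
-- p += 2), returning the appended entries together with the final m; fuel as above
def oddLoopB : Nat → Nat → Nat → List (Int × Int) × Nat
  | 0, m, _ => ([], m)
  | fuel + 1, m, p =>
    if p * p ≤ m then
      ((if (stripLoop m m p).2 ≠ 0 then [((p : Int), ((stripLoop m m p).2 : Int))] else []) ++
          (oddLoopB fuel (stripLoop m m p).1 (p + 2)).1,
        (oddLoopB fuel (stripLoop m m p).1 (p + 2)).2)
    else ([], m)

-- Source B's _factor: strip 2 (the 'while m % 2 == 0 and m > 0' loop is stripLoop's guard
-- verbatim), then odd candidates, then the trailing 'if m > 1' append; m lives in Nat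
-- as in factorize above (call sites pass n ≥ 1)
def factorB (n : Int) : List (Int × Int) :=
  (if (stripLoop n.toNat n.toNat 2).2 ≠ 0
    then [((2 : Int), ((stripLoop n.toNat n.toNat 2).2 : Int))] else []) ++
  (oddLoopB ((stripLoop n.toNat n.toNat 2).1 + 1) (stripLoop n.toNat n.toNat 2).1 3).1 ++
  (if 1 < (oddLoopB ((stripLoop n.toNat n.toNat 2).1 + 1) (stripLoop n.toNat n.toNat 2).1 3).2
    then [(((oddLoopB ((stripLoop n.toNat n.toNat 2).1 + 1) (stripLoop n.toNat n.toNat 2).1 3).2 : Int), 1)]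
    else [])

-- _mult(p, m): count of factors p in m; fuel/guard as in stripLoop (call sites pass a
-- prime p ≥ 2 and m ≥ 1)
def multLoop : Nat → Nat → Nat → Nat
  | 0, _, _ => 0
  | fuel + 1, p, m => if 2 ≤ p ∧ 0 < m ∧ m % p = 0 then multLoop fuel p (m / p) + 1 else 0

-- _mult over Python ints; exact at every call site (p ≥ 2, m ≥ 1)
def multI (p m : Int) : Int := (multLoop m.toNat p.toNat m.toNat : Int)

-- one 'for p, e in _factor(x): if chi ... and (e + _mult(p, other)) % 2 == 1: return False' loop of _ok
def okLoop (D other : Int) : List (Int × Int) → Bool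
  | [] => true
  | (p, e) :: rest =>
      if chiD D p = -1 ∧ PySem.Int.mod (e + multI p other) 2 = 1 then false
      else okLoop D other rest

-- _ok: first loop over _factor(a), then over _factor(b)
def okB (D a b : Int) : Bool := okLoop D b (factorB a) && okLoop D a (factorB b)

def N_bruteforce_alt (D : Int) (R : Int) : Int :=
  (PySem.List.pyRange 1 R 1).foldl
    (fun cnt c => if okB D (R - c) (R + c) then cnt + 1 else cnt) 0

-- ===== PRECONDITION & SPEC =====
def Spec_N_bruteforce (D : Int) (R : Int) (out : Int) : Prop := out = N_bruteforce_alt D R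
instance (D : Int) (R : Int) (out : Int) : Decidable (Spec_N_bruteforce D R out) := by unfold Spec_N_bruteforce; infer_instance

-- ===== CLAIM (what is proved, stated in full; the proofs are below) =====
def Claim_equal_N_bruteforce : Prop := ∀ (D : Int) (R : Int), Dom_N_bruteforce D R → Spec_N_bruteforce D R (N_bruteforce D R)

-- ===== LEMMAS AND PROOFS =====

lemma stripLoop_fst_le (fuel t p : Nat) : (stripLoop fuel t p).1 ≤ t := by
  induction fuel generalizing t with
  | zero => simp [stripLoop]
  | succ fuel ih =>
      rw [stripLoop]
      split
      · exact le_trans (ih _) (Nat.div_le_self _ _)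
      · simp

lemma stripLoop_spec (fuel t p : Nat) (hp : 2 ≤ p) (hf : t ≤ fuel) (ht : 0 < t) :
    t = (stripLoop fuel t p).1 * p ^ (stripLoop fuel t p).2 ∧
      ¬ p ∣ (stripLoop fuel t p).1 ∧ 0 < (stripLoop fuel t p).1 := by
  induction fuel generalizing t with
  | zero => omega
  | succ fuel ih =>
      rw [stripLoop]
      by_cases h : 2 ≤ p ∧ 0 < t ∧ t % p = 0
      · rw [if_pos h]
        have hdvd : p ∣ t := Nat.dvd_of_mod_eq_zero h.2.2
        have hlt : t / p < t := Nat.div_lt_self ht (by omega)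
        have htp : 0 < t / p := Nat.div_pos (Nat.le_of_dvd ht hdvd) (by omega)
        obtain ⟨e1, e2, e3⟩ := ih (t / p) (by omega) htp
        refine ⟨?_, e2, e3⟩
        have hc : t / p * p = t := Nat.div_mul_cancel hdvd
        calc t = (t / p) * p := hc.symm
          _ = ((stripLoop fuel (t / p) p).1 * p ^ (stripLoop fuel (t / p) p).2) * p := by
              rw [← e1]
          _ = (stripLoop fuel (t / p) p).1 * p ^ ((stripLoop fuel (t / p) p).2 + 1) := by ring
      · rw [if_neg h]
        refine ⟨by simp, ?_, ht⟩
        intro hdvd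
        exact h ⟨hp, ht, Nat.mod_eq_zero_of_dvd hdvd⟩

lemma multLoop_eq_strip (fuel p m : Nat) : multLoop fuel p m = (stripLoop fuel m p).2 := by
  induction fuel generalizing m with
  | zero => simp [multLoop, stripLoop]
  | succ fuel ih =>
      rw [multLoop, stripLoop]
      by_cases h : 2 ≤ p ∧ 0 < m ∧ m % p = 0
      · rw [if_pos h, if_pos h]
        simp [ih]
      · rw [if_neg h, if_neg h]

-- factorization of t from the strip decomposition t = t' * p^e, p ∤ t'
lemma fact_of_strip {t t' e p : Nat} (hp : p.Prime) (heq : t = t' * p ^ e)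
    (hnd : ¬ p ∣ t') (ht' : 0 < t') :
    t.factorization p = e ∧ ∀ q : Nat, q ≠ p → t.factorization q = t'.factorization q := by
  have hpe : p ^ e ≠ 0 := pow_ne_zero e hp.pos.ne'
  have hmul : t.factorization = t'.factorization + (p ^ e).factorization := by
    rw [heq, Nat.factorization_mul ht'.ne' hpe]
  have hpow : (p ^ e).factorization = Finsupp.single p e := hp.factorization_pow
  constructor
  · have h0 : t'.factorization p = 0 := Nat.factorization_eq_zero_of_not_dvd hnd
    rw [hmul, hpow]
    simp [h0]
  · intro q hq
    rw [hmul, hpow]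
    simp [Ne.symm hq]

lemma multLoop_factorization (fuel p m : Nat) (hp : p.Prime) (hf : m ≤ fuel) (hm : 0 < m) :
    multLoop fuel p m = m.factorization p := by
  obtain ⟨e1, e2, e3⟩ := stripLoop_spec fuel m p hp.two_le hf hm
  rw [multLoop_eq_strip]
  exact ((fact_of_strip hp e1 e2 e3).1).symm

-- a prime at or above the trial divisor cannot be composite: the divisor candidate p
-- divides t and all primes below p have been removed
lemma trial_prime (t p : Nat) (hp : 2 ≤ p) (hdvd : p ∣ t)
    (hinv : ∀ q : Nat, q.Prime → q ∣ t → p ≤ q) : p.Prime := by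
  rw [Nat.prime_def_minFac]
  refine ⟨hp, le_antisymm (Nat.minFac_le (by omega)) ?_⟩
  exact hinv p.minFac (Nat.minFac_prime (by omega)) ((Nat.minFac_dvd p).trans hdvd)

-- the loop-exit tail 'if t > 1: out.append((t, 1))', characterised: the remaining t is
-- 1 or a single prime
lemma factExit_mem (t p : Nat) (ht : 0 < t) (_hp : 2 ≤ p)
    (hinv : ∀ q : Nat, q.Prime → q ∣ t → p ≤ q) (hlt : ¬ p * p ≤ t) (x : Int × Int) :
    (x ∈ if 1 < t then [((t : Int), 1)] else []) ↔
      ∃ q : Nat, q.Prime ∧ q ∣ t ∧ x = ((q : Int), (t.factorization q : Int)) := by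
  by_cases h1 : 1 < t
  · have htprime : t.Prime := by
      by_contra hnp
      have hmf : t.minFac.Prime := Nat.minFac_prime (by omega)
      have hple : p ≤ t.minFac := hinv t.minFac hmf (Nat.minFac_dvd t)
      have hsq : t.minFac * t.minFac ≤ t := by
        have := Nat.minFac_sq_le_self (by omega) hnp
        simpa [pow_two] using this
      exact hlt (le_trans (Nat.mul_le_mul hple hple) hsq)
    rw [if_pos h1]
    simp only [List.mem_singleton]
    constructor
    · rintro rfl
      refine ⟨t, htprime, dvd_rfl, ?_⟩
      rw [Nat.Prime.factorization_self htprime]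
      norm_num
    · rintro ⟨q, hq, hqd, rfl⟩
      have : q = t := ((Nat.Prime.eq_one_or_self_of_dvd htprime q hqd).resolve_left hq.ne_one)
      subst this
      rw [Nat.Prime.factorization_self hq]
      norm_num
  · have ht1 : t = 1 := by omega
    subst ht1
    rw [if_neg h1]
    simp only [List.not_mem_nil, false_iff]
    rintro ⟨q, hq, hqd, -⟩
    exact hq.ne_one (Nat.eq_one_of_dvd_one hqd)

-- prepending the freshly stripped prime power to a correct tail stays correct
lemma cons_step (t t' e p : Nat) (hp : p.Prime) (heq : t = t' * p ^ e) (he : 0 < e)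
    (hnd : ¬ p ∣ t') (ht' : 0 < t') (L : List (Int × Int))
    (hL : ∀ y : Int × Int,
      y ∈ L ↔ ∃ q : Nat, q.Prime ∧ q ∣ t' ∧ y = ((q : Int), (t'.factorization q : Int)))
    (x : Int × Int) :
    x ∈ ((p : Int), (e : Int)) :: L ↔
      ∃ q : Nat, q.Prime ∧ q ∣ t ∧ x = ((q : Int), (t.factorization q : Int)) := by
  obtain ⟨hfp, hfq⟩ := fact_of_strip hp heq hnd ht'
  have hpd : p ∣ t := by
    rw [heq]
    exact Dvd.dvd.mul_left (dvd_pow_self p he.ne') t'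
  have ht'd : t' ∣ t := ⟨p ^ e, heq⟩
  constructor
  · intro hx
    rcases List.mem_cons.mp hx with rfl | hmem
    · exact ⟨p, hp, hpd, by rw [hfp]⟩
    · obtain ⟨q, hq, hqd, rfl⟩ := (hL _).mp hmem
      have hqne : q ≠ p := fun h => hnd (h ▸ hqd)
      exact ⟨q, hq, hqd.trans ht'd, by rw [hfq q hqne]⟩
  · rintro ⟨q, hq, hqd, rfl⟩
    by_cases hqp : q = p
    · subst hqp
      exact List.mem_cons.mpr (Or.inl (by rw [hfp]))
    · have hqd' : q ∣ t' := by
        rcases (Nat.Prime.dvd_mul hq).mp (heq ▸ hqd) with h | h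
        · exact h
        · exact absurd ((Nat.prime_dvd_prime_iff_eq hq hp).mp (hq.dvd_of_dvd_pow h)) hqp
      refine List.mem_cons.mpr (Or.inr ((hL _).mpr ⟨q, hq, hqd', ?_⟩))
      rw [hfq q hqp]

-- stepping facts for A's candidate sequence 2, 3, 5, 7, ...
lemma next_facts (p : Nat) (hp : 2 ≤ p) (hodd : p = 2 ∨ p % 2 = 1) :
    2 ≤ nextP p ∧ p + 1 ≤ nextP p ∧ (nextP p = 2 ∨ nextP p % 2 = 1) ∧
      (∀ q : Nat, q.Prime → p ≤ q → q ≠ p → nextP p ≤ q) := by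
  unfold nextP
  by_cases h2 : p = 2
  · subst h2
    refine ⟨by norm_num, by norm_num, Or.inr (by norm_num), ?_⟩
    intro q hq hle hne
    have h3 : (if (2 : Nat) = 2 then 3 else 2 + 2) = 3 := rfl
    rw [h3]
    omega
  · have hop : p % 2 = 1 := by omega
    simp only [if_neg h2]
    refine ⟨by omega, by omega, Or.inr (by omega), ?_⟩
    intro q hq hle hne
    by_cases hq1 : q = p + 1
    · exfalso
      have heven : Even q := by rw [hq1]; exact ⟨(p + 1) / 2, by omega⟩
      have := (Nat.Prime.even_iff hq).mp heven
      omega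
    · omega

-- odd primes above an odd candidate skip the even successor
lemma odd_step (p : Nat) (hp3 : 3 ≤ p) (hodd : p % 2 = 1) (q : Nat) (hq : q.Prime) (hle : p ≤ q)
    (hne : q ≠ p) : p + 2 ≤ q := by
  by_cases hq1 : q = p + 1
  · exfalso
    have heven : Even q := by rw [hq1]; exact ⟨(p + 1) / 2, by omega⟩
    have := (Nat.Prime.even_iff hq).mp heven
    have h2q : 2 ≤ q := hq.two_le
    omega
  · omega

-- correctness of A's trial-division loop: its entries are exactly the
-- (prime divisor, multiplicity) pairs of t
lemma factLoop_mem (fuel : Nat) :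
    ∀ t p : Nat, t + 1 - p ≤ fuel → 0 < t → 2 ≤ p → (p = 2 ∨ p % 2 = 1) →
      (∀ q : Nat, q.Prime → q ∣ t → p ≤ q) →
      ∀ x : Int × Int, (x ∈ factLoop fuel t p ↔
        ∃ q : Nat, q.Prime ∧ q ∣ t ∧ x = ((q : Int), (t.factorization q : Int))) := by
  induction fuel with
  | zero =>
      intro t p hf ht hp hodd hinv x
      have hlt : ¬ p * p ≤ t := by
        intro hle
        have hpl : p ≤ p * p := Nat.le_mul_of_pos_left p (by omega)
        omega
      rw [factLoop]
      exact factExit_mem t p ht hp hinv hlt x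
  | succ fuel ih =>
      intro t p hf ht hp hodd hinv x
      rw [factLoop]
      by_cases hpp : p * p ≤ t
      · rw [if_pos hpp]
        have hppt : p ≤ t := le_trans (Nat.le_mul_of_pos_left p (by omega)) hpp
        obtain ⟨hn2, hn1, hnodd, hnstep⟩ := next_facts p hp hodd
        by_cases hmod : t % p = 0
        · rw [if_pos hmod]
          have hdvd : p ∣ t := Nat.dvd_of_mod_eq_zero hmod
          have hpprime : p.Prime := trial_prime t p hp hdvd hinv
          obtain ⟨e1, e2, e3⟩ := stripLoop_spec t t p hp le_rfl ht
          have he : 0 < (stripLoop t t p).2 := by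
            rcases Nat.eq_zero_or_pos (stripLoop t t p).2 with h0 | h0
            · exfalso
              rw [h0, pow_zero, Nat.mul_one] at e1
              exact e2 (e1 ▸ hdvd)
            · exact h0
          have hs1d : (stripLoop t t p).1 ∣ t := ⟨p ^ (stripLoop t t p).2, e1⟩
          have hinv' : ∀ q : Nat, q.Prime → q ∣ (stripLoop t t p).1 → nextP p ≤ q := by
            intro q hq hqd
            have hqt : q ∣ t := hqd.trans hs1d
            have hqne : q ≠ p := fun h => e2 (h ▸ hqd)
            exact hnstep q hq (hinv q hq hqt) hqne
          have hs1le := stripLoop_fst_le t t p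
          have hL := ih (stripLoop t t p).1 (nextP p) (by omega) e3 hn2 hnodd hinv'
          exact cons_step t (stripLoop t t p).1 (stripLoop t t p).2 p hpprime e1 he e2 e3 _ hL x
        · rw [if_neg hmod]
          have hinv' : ∀ q : Nat, q.Prime → q ∣ t → nextP p ≤ q := by
            intro q hq hqd
            have hqne : q ≠ p := by
              rintro rfl
              exact hmod (Nat.mod_eq_zero_of_dvd hqd)
            exact hnstep q hq (hinv q hq hqd) hqne
          exact ih t (nextP p) (by omega) ht hn2 hnodd hinv' x
      · rw [if_neg hpp]
        exact factExit_mem t p ht hp hinv hpp x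

lemma factorize_mem (m : Nat) (hm : 0 < m) (x : Int × Int) :
    x ∈ factorize (m : Int) ↔
      ∃ q : Nat, q.Prime ∧ q ∣ m ∧ x = ((q : Int), (m.factorization q : Int)) := by
  have h : ((m : Int)).toNat = m := Int.toNat_natCast m
  rw [factorize, h]
  exact factLoop_mem (m + 1) m 2 (by omega) hm le_rfl (Or.inl rfl)
    (fun q hq _ => hq.two_le) x

-- correctness of B's odd-candidate loop together with the trailing 'if m > 1' append
lemma oddLoopB_mem (fuel : Nat) :
    ∀ m p : Nat, m + 1 - p ≤ fuel → 0 < m → 3 ≤ p → p % 2 = 1 →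
      (∀ q : Nat, q.Prime → q ∣ m → p ≤ q) →
      ∀ x : Int × Int, ((x ∈ (oddLoopB fuel m p).1 ++
          (if 1 < (oddLoopB fuel m p).2 then [(((oddLoopB fuel m p).2 : Int), 1)] else [])) ↔
        ∃ q : Nat, q.Prime ∧ q ∣ m ∧ x = ((q : Int), (m.factorization q : Int))) := by
  induction fuel with
  | zero =>
      intro m p hf hm hp hodd hinv x
      have hlt : ¬ p * p ≤ m := by
        intro hle
        have hpl : p ≤ p * p := Nat.le_mul_of_pos_left p (by omega)
        omega
      rw [oddLoopB]
      simpa using factExit_mem m p hm (by omega) hinv hlt x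
  | succ fuel ih =>
      intro m p hf hm hp hodd hinv x
      rw [oddLoopB]
      by_cases hpp : p * p ≤ m
      · rw [if_pos hpp]
        have hppm : p ≤ m := le_trans (Nat.le_mul_of_pos_left p (by omega)) hpp
        obtain ⟨e1, e2, e3⟩ := stripLoop_spec m m p (by omega) le_rfl hm
        have hs1le := stripLoop_fst_le m m p
        by_cases hz : (stripLoop m m p).2 = 0
        · have hs1m : (stripLoop m m p).1 = m := by
            rw [hz, pow_zero, Nat.mul_one] at e1
            exact e1.symm
          have hnd : ¬ p ∣ m := hs1m ▸ e2
          have hinv' : ∀ q : Nat, q.Prime → q ∣ (stripLoop m m p).1 → p + 2 ≤ q := by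
            rw [hs1m]
            intro q hq hqd
            have hqne : q ≠ p := by
              rintro rfl
              exact hnd hqd
            exact odd_step p hp hodd q hq (hinv q hq hqd) hqne
          have hIH := ih (stripLoop m m p).1 (p + 2) (by omega) e3 (by omega) (by omega) hinv'
          simp only [if_neg (not_not_intro hz), List.nil_append]
          rw [hs1m] at hIH ⊢
          exact hIH x
        · have he : 0 < (stripLoop m m p).2 := Nat.pos_of_ne_zero hz
          have hdvd : p ∣ m := by
            rw [e1]
            exact Dvd.dvd.mul_left (dvd_pow_self p he.ne') _
          have hpprime : p.Prime := trial_prime m p (by omega) hdvd hinv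
          have hs1d : (stripLoop m m p).1 ∣ m := ⟨p ^ (stripLoop m m p).2, e1⟩
          have hinv' : ∀ q : Nat, q.Prime → q ∣ (stripLoop m m p).1 → p + 2 ≤ q := by
            intro q hq hqd
            have hqt : q ∣ m := hqd.trans hs1d
            have hqne : q ≠ p := fun h => e2 (h ▸ hqd)
            exact odd_step p hp hodd q hq (hinv q hq hqt) hqne
          have hIH := ih (stripLoop m m p).1 (p + 2) (by omega) e3 (by omega) (by omega) hinv'
          simp only [if_pos hz, List.singleton_append]
          exact cons_step m (stripLoop m m p).1 (stripLoop m m p).2 p hpprime e1 he e2 e3 _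
            hIH x
      · rw [if_neg hpp]
        simpa using factExit_mem m p hm (by omega) hinv hpp x

lemma factorB_mem (m : Nat) (hm : 0 < m) (x : Int × Int) :
    x ∈ factorB (m : Int) ↔
      ∃ q : Nat, q.Prime ∧ q ∣ m ∧ x = ((q : Int), (m.factorization q : Int)) := by
  have h : ((m : Int)).toNat = m := Int.toNat_natCast m
  rw [factorB]
  simp only [h]
  obtain ⟨e1, e2, e3⟩ := stripLoop_spec m m 2 le_rfl le_rfl hm
  have hinv3 : ∀ q : Nat, q.Prime → q ∣ (stripLoop m m 2).1 → 3 ≤ q := by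
    intro q hq hqd
    have hqne : q ≠ 2 := by
      rintro rfl
      exact e2 hqd
    have := hq.two_le
    omega
  have hO := oddLoopB_mem ((stripLoop m m 2).1 + 1) (stripLoop m m 2).1 3
    (by omega) e3 le_rfl rfl hinv3
  by_cases hz : (stripLoop m m 2).2 = 0
  · have hs1m : (stripLoop m m 2).1 = m := by
      rw [hz, pow_zero, Nat.mul_one] at e1
      exact e1.symm
    simp only [if_neg (not_not_intro hz), List.nil_append]
    rw [hs1m] at hO
    rw [hs1m]
    exact hO x
  · have he : 0 < (stripLoop m m 2).2 := Nat.pos_of_ne_zero hz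
    simp only [if_pos hz, List.singleton_append]
    exact cons_step m (stripLoop m m 2).1 (stripLoop m m 2).2 2 Nat.prime_two e1 he e2 e3 _
      hO x

lemma inertLoop_iff (D : Int) (L : List (Int × Int)) :
    inertLoop D L = true ↔ ∀ x ∈ L, ¬(chiD D x.1 = -1 ∧ PySem.Int.mod x.2 2 = 1) := by
  induction L with
  | nil =>
      constructor
      · intro _ x hx; exact absurd hx (List.not_mem_nil)
      · intro _; rfl
  | cons x rest ih =>
      obtain ⟨p, e⟩ := x
      rw [inertLoop]
      by_cases h : chiD D p = -1 ∧ PySem.Int.mod e 2 = 1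
      · simp only [if_pos h]
        simp only [Bool.false_eq_true, false_iff, not_forall]
        exact ⟨(p, e), List.mem_cons_self, not_not_intro h⟩
      · simp only [if_neg h, ih, List.mem_cons]
        constructor
        · rintro hall x (rfl | hx)
          · exact h
          · exact hall x hx
        · intro hall x hx
          exact hall x (Or.inr hx)

lemma okLoop_iff (D other : Int) (L : List (Int × Int)) :
    okLoop D other L = true ↔
      ∀ x ∈ L, ¬(chiD D x.1 = -1 ∧ PySem.Int.mod (x.2 + multI x.1 other) 2 = 1) := by
  induction L with
  | nil =>
      constructor
      · intro _ x hx; exact absurd hx (List.not_mem_nil)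
      · intro _; rfl
  | cons x rest ih =>
      obtain ⟨p, e⟩ := x
      rw [okLoop]
      by_cases h : chiD D p = -1 ∧ PySem.Int.mod (e + multI p other) 2 = 1
      · simp only [if_pos h]
        simp only [Bool.false_eq_true, false_iff, not_forall]
        exact ⟨(p, e), List.mem_cons_self, not_not_intro h⟩
      · simp only [if_neg h, ih, List.mem_cons]
        constructor
        · rintro hall x (rfl | hx)
          · exact h
          · exact hall x hx
        · intro hall x hx
          exact hall x (Or.inr hx)

lemma mod_cast_one (e : Nat) : PySem.Int.mod ((e : Int)) 2 = 1 ↔ e % 2 = 1 := by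
  have h : PySem.Int.mod ((e : Int)) 2 = ((e % 2 : Nat) : Int) := by
    exact_mod_cast PySem.Int.mod_natCast e 2
  rw [h]
  exact_mod_cast Iff.rfl

-- A's test on m, characterised
lemma inert_char (D : Int) (m : Nat) (hm : 0 < m) :
    inertLoop D (factorize (m : Int)) = true ↔
      ∀ q : Nat, q.Prime → q ∣ m → ¬(chiD D q = -1 ∧ m.factorization q % 2 = 1) := by
  rw [inertLoop_iff]
  constructor
  · intro hall q hq hqd
    have h0 := hall ((q : Int), (m.factorization q : Int))
      ((factorize_mem m hm _).mpr ⟨q, hq, hqd, rfl⟩)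
    rw [mod_cast_one] at h0
    exact h0
  · intro hall x hx
    obtain ⟨q, hq, hqd, rfl⟩ := (factorize_mem m hm x).mp hx
    show ¬(chiD D (q : Int) = -1 ∧ PySem.Int.mod ((m.factorization q : Nat) : Int) 2 = 1)
    rw [mod_cast_one]
    exact hall q hq hqd

-- one _ok loop, characterised
lemma ok_char (D : Int) (a b : Nat) (ha : 0 < a) (hb : 0 < b) :
    okLoop D (b : Int) (factorB (a : Int)) = true ↔
      ∀ q : Nat, q.Prime → q ∣ a →
        ¬(chiD D q = -1 ∧ (a.factorization q + b.factorization q) % 2 = 1) := by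
  rw [okLoop_iff]
  have hmult : ∀ q : Nat, q.Prime →
      multI (q : Int) (b : Int) = (b.factorization q : Int) := by
    intro q hq
    rw [multI, Int.toNat_natCast, Int.toNat_natCast,
      multLoop_factorization b q b hq le_rfl hb]
  constructor
  · intro hall q hq hqd
    have h0 := hall ((q : Int), (a.factorization q : Int))
      ((factorB_mem a ha _).mpr ⟨q, hq, hqd, rfl⟩)
    rw [hmult q hq] at h0
    have hc : ((a.factorization q : Int)) + ((b.factorization q : Int)) =
        (((a.factorization q + b.factorization q : Nat)) : Int) := by push_cast; ring
    rw [hc, mod_cast_one] at h0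
    exact h0
  · intro hall x hx
    obtain ⟨q, hq, hqd, rfl⟩ := (factorB_mem a ha x).mp hx
    have h0 := hall q hq hqd
    rw [hmult q hq]
    have hc : ((a.factorization q : Int)) + ((b.factorization q : Int)) =
        (((a.factorization q + b.factorization q : Nat)) : Int) := by push_cast; ring
    rw [hc, mod_cast_one]
    exact h0

-- the per-c equivalence
lemma pointwise (D : Int) (a b : Nat) (ha : 0 < a) (hb : 0 < b) :
    is_norm_inerte_only D ((a : Int) * (b : Int)) = okB D (a : Int) (b : Int) := by
  have hab : 0 < a * b := Nat.mul_pos ha hb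
  have hcast : (a : Int) * (b : Int) = ((a * b : Nat) : Int) := by push_cast; ring
  have hpos : ¬ ((a : Int) * (b : Int) ≤ 0) := by
    rw [hcast]
    exact not_le.mpr (by exact_mod_cast hab)
  rw [is_norm_inerte_only, if_neg hpos, okB, Bool.eq_iff_iff, Bool.and_eq_true, hcast]
  rw [inert_char D (a * b) hab, ok_char D a b ha hb, ok_char D b a hb ha]
  have hfact : ∀ q : Nat, q.Prime →
      (a * b).factorization q = a.factorization q + b.factorization q := by
    intro q hq
    rw [Nat.factorization_mul ha.ne' hb.ne']
    simp
  constructor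
  · intro hall
    constructor
    · intro q hq hqd
      rw [← hfact q hq]
      exact hall q hq (hqd.mul_right b)
    · intro q hq hqd
      rw [Nat.add_comm, ← hfact q hq]
      exact hall q hq (hqd.mul_left a)
  · rintro ⟨h1, h2⟩ q hq hqd
    rcases (Nat.Prime.dvd_mul hq).mp hqd with hd | hd
    · rw [hfact q hq]
      exact h1 q hq hd
    · rw [hfact q hq, Nat.add_comm]
      exact h2 q hq hd

-- ===== VERDICT (by name: the statement is the Claim_ definition above) =====
theorem N_bruteforce_spec : Claim_equal_N_bruteforce := by
  intro D R _
  unfold Spec_N_bruteforce N_bruteforce N_bruteforce_alt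
  apply PySem.List.foldl_congr_mem
  intro acc c hc
  rw [PySem.List.mem_pyRange_one] at hc
  have h1 : (1 : Int) ≤ c := hc.1
  have h2 : c < R := hc.2
  have hab : R * R - c * c = ((R - c).toNat : Int) * ((R + c).toNat : Int) := by
    have e1 : ((R - c).toNat : Int) = R - c := Int.toNat_of_nonneg (by omega)
    have e2 : ((R + c).toNat : Int) = R + c := Int.toNat_of_nonneg (by omega)
    rw [e1, e2]; ring
  have hA : (R - c).toNat > 0 := by omega
  have hB : (R + c).toNat > 0 := by omega
  have hpt := pointwise D (R - c).toNat (R + c).toNat hA hB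
  rw [hab, hpt]
  have e1 : ((R - c).toNat : Int) = R - c := Int.toNat_of_nonneg (by omega)
  have e2 : ((R + c).toNat : Int) = R + c := Int.toNat_of_nonneg (by omega)
  rw [e1, e2]
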